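-- pv_equiv track=rewrite | github.com/yuvalweil/RoomAssignmentSolver | logic/diagnostics.py | _perfect_matching
-- ===== SOURCE A (Python) =====
-- from typing import Dict, List, Tuple, DefaultDict
--
-- def _perfect_matching(choices: Dict[int, List[str]]) -> bool:
--     matchR: Dict[str, int] = {}
--     def dfs(u: int, seen: set) -> bool:
--         for v in choices.get(u, []):
--             if v in seen:
--                 continue
--             seen.add(v)
--             if v not in matchR or dfs(matchR[v], seen):
--                 matchR[v] = u
--                 return True
--         return False
--     for u in choices.keys():
--         if not dfs(u, set()):
--             return False
--     return True
-- ===== SOURCE B (Python) =====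
-- def _perfect_matching(choices):
--     # Iterative Kuhn augmenting-path search: explicit frame stack instead of
--     # recursion; each frame remembers the matched vertex it descended through,
--     # and on success the alternating path is flipped by walking the stack.
--     matchR = {}
--     for root in choices.keys():
--         seen = set()
--         stack = [(root, None, list(choices.get(root, [])))]
--         found = False
--         while stack:
--             u, via, nbrs = stack.pop()
--             if not nbrs:
--                 continue  # dead end: backtrack, parent frame resumes
--             v, rest = nbrs[0], nbrs[1:]
--             if v in seen:
--                 stack.append((u, via, rest))
--                 continue
--             seen.add(v)
--             if v not in matchR:
--                 matchR[v] = u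
--                 for pu, pvia, _ in reversed(stack):  # flip alternating path
--                     matchR[pvia] = pu
--                 found = True
--                 break
--             stack.append((u, v, rest))
--             stack.append((matchR[v], None, list(choices.get(matchR[v], []))))
--         if not found:
--             return False
--     return True
-- ===== Notes on version B (the rewrite author's own statement) =====
-- stated objective: alternative
-- what changed: A's recursive DFS (which assigns the matching while unwinding the call stack) is replaced by an iterative search over an explicit frame stack: each frame keeps its remaining neighbours and the matched vertex it descended through, and on reaching a free vertex the alternating path is flipped by walking the stack; this also avoids Python's recursion limit on long augmenting chains.
import Mathlib
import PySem

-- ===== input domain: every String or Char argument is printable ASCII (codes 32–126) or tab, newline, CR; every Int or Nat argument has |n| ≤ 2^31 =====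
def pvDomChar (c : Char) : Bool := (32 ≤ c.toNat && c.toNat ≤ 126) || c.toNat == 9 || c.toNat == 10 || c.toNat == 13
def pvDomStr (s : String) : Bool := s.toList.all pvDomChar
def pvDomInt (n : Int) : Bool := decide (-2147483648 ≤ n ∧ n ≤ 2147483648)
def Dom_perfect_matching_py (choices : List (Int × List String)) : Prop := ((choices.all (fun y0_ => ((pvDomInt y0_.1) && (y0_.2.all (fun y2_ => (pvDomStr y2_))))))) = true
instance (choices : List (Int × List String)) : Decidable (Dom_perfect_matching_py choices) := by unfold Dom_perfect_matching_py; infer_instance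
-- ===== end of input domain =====

-- B replaces A's recursive DFS (which mutates the matching while unwinding) by an
-- explicit-stack iterative search that flips the alternating path on success:
-- same augmenting-path strategy, different decomposition (objective: alternative).

-- ===== PORT A =====
-- dfs(u, seen): the for-loop over the remaining neighbours becomes structural
-- recursion on the list; the recursive call dfs(matchR[v], seen) becomes the
-- fuel-guarded self-call (fuel only makes the recursion total: Python's recursion
-- terminates because `seen` strictly grows, and the fuel chosen below suffices).
-- Returns (result, matchR, seen) since Python mutates matchR and seen in place.
def goA (adj : PySem.Dict Int (List String)) :
    Nat → Int → List String → PySem.Dict String Int → PySem.Set String →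
    Option (Bool × PySem.Dict String Int × PySem.Set String)
  | _, _, [], mR, seen => some (false, mR, seen)
  | f, u, v :: vs, mR, seen =>
    if PySem.Set.contains seen v then goA adj f u vs mR seen
    else
      match mR.get? v, f with
      | none, _ => some (true, mR.insert v u, PySem.Set.add seen v)
      | some _, 0 => none
      | some w, g + 1 =>
        match goA adj g w (adj.getD w []) mR (PySem.Set.add seen v) with
        | none => none
        | some (true, mR1, s1) => some (true, mR1.insert v u, s1)
        | some (false, mR1, s1) => goA adj (g + 1) u vs mR1 s1
  termination_by f _ l _ _ => (f, l.length)

-- for u in choices.keys(): if not dfs(u, set()): return False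
def loopA (adj : PySem.Dict Int (List String)) (fuel : Nat) :
    List Int → PySem.Dict String Int → Bool
  | [], _ => true
  | u :: us, mR =>
    match goA adj fuel u (adj.getD u []) mR PySem.Set.empty with
    | none => false
    | some (true, mR1, _) => loopA adj fuel us mR1
    | some (false, _, _) => false

def perfect_matching_py (choices : List (Int × List String)) : Bool :=
  let adj := PySem.Dict.ofList choices
  let fuel := (choices.flatMap (fun p => p.2)).length  -- depth bound: seen grows on each nested dfs call
  loopA adj fuel adj.keys PySem.Dict.empty

-- ===== PORT B =====
-- for pu, pvia, _ in reversed(stack): matchR[pvia] = pu   (stack head = top)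
def flipB : List (Int × Option String × List String) →
    PySem.Dict String Int → PySem.Dict String Int
  | [], mR => mR
  | (pu, via, _) :: rest, mR =>
    match via with
    | some pv => flipB rest (mR.insert pv pu)
    | none => flipB rest mR

-- the while-loop over the frame stack; fuel only makes the loop total
def stepB (adj : PySem.Dict Int (List String)) :
    Nat → List (Int × Option String × List String) →
    PySem.Dict String Int → PySem.Set String →
    Option (Bool × PySem.Dict String Int)
  | 0, _, _, _ => none
  | _ + 1, [], mR, _ => some (false, mR)
  | f + 1, (u, via, nbrs) :: stack, mR, seen =>
    match nbrs with
    | [] => stepB adj f stack mR seen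
    | v :: rest =>
      if PySem.Set.contains seen v then stepB adj f ((u, via, rest) :: stack) mR seen
      else
        let seen1 := PySem.Set.add seen v
        match mR.get? v with
        | none => some (true, flipB stack (mR.insert v u))
        | some w =>
          stepB adj f ((w, none, adj.getD w []) :: (u, some v, rest) :: stack) mR seen1

-- for root in choices.keys(): run one stack search from root
def loopB (adj : PySem.Dict Int (List String)) (fuel : Nat) :
    List Int → PySem.Dict String Int → Bool
  | [], _ => true
  | root :: us, mR =>
    match stepB adj fuel [(root, none, adj.getD root [])] mR PySem.Set.empty with
    | none => false
    | some (true, mR1) => loopB adj fuel us mR1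
    | some (false, _) => false

def perfect_matching_py_alt (choices : List (Int × List String)) : Bool :=
  let adj := PySem.Dict.ofList choices
  let s := (choices.flatMap (fun p => p.2)).length
  let fuel := s * (s + 2) + s + 2  -- step bound for the while loop
  loopB adj fuel adj.keys PySem.Dict.empty

-- ===== PRECONDITION & SPEC =====
def Spec_perfect_matching_py (choices : List (Int × List String)) (out : Bool) : Prop := out = perfect_matching_py_alt choices
instance (choices : List (Int × List String)) (out : Bool) : Decidable (Spec_perfect_matching_py choices out) := by unfold Spec_perfect_matching_py; infer_instance

-- ===== CLAIM (what is proved, stated in full; the proofs are below) =====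
def Claim_equal_perfect_matching_py : Prop := ∀ (choices : List (Int × List String)), Dom_perfect_matching_py choices → Spec_perfect_matching_py choices (perfect_matching_py choices)

-- ===== LEMMAS AND PROOFS =====

-- proof-side abbreviations
-- number of right vertices of allR not yet in seen (the DFS depth budget)
def pvUnseen (allR : List String) (seen : PySem.Set String) : Nat :=
  (allR.toFinset \ seen.toFinset).card

-- goA run with exactly the canonical (sufficient) fuel
def goAC (adj : PySem.Dict Int (List String)) (allR : List String)
    (u : Int) (nbrs : List String) (mR : PySem.Dict String Int) (seen : PySem.Set String) :
    Option (Bool × PySem.Dict String Int × PySem.Set String) :=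
  goA adj (pvUnseen allR seen) u nbrs mR seen

-- A-side meaning of a B-side frame stack
def specStack (adj : PySem.Dict Int (List String)) (allR : List String) :
    List (Int × Option String × List String) → PySem.Dict String Int → PySem.Set String →
    Option (Bool × PySem.Dict String Int)
  | [], mR, _ => some (false, mR)
  | (u, _, nbrs) :: rest, mR, seen =>
    match goAC adj allR u nbrs mR seen with
    | none => none
    | some (true, mR1, _) => some (true, flipB rest mR1)
    | some (false, mR1, s1) => specStack adj allR rest mR1 s1

-- weight of a stack: total pending neighbours plus number of frames
def pvWt : List (Int × Option String × List String) → Nat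
  | [] => 0
  | (_, _, nbrs) :: rest => nbrs.length + 1 + pvWt rest

-- every value list of Dict.ofList choices is [] or one of choices' value lists
theorem insert_values {κ ν : Type} [BEq κ] (d : PySem.Dict κ ν) (k : κ) (v : ν)
    (q : κ × ν) (hq : q ∈ (d.insert k v).items) :
    q.2 = v ∨ q.2 ∈ d.items.map (fun p => p.2) := by
  unfold PySem.Dict.insert at hq
  split at hq
  · obtain ⟨p, hp, hpe⟩ := List.mem_map.mp hq
    by_cases hpk : (p.1 == k) = true
    · simp [hpk] at hpe; left; rw [← hpe]
    · simp [hpk] at hpe; right; rw [← hpe]; exact List.mem_map_of_mem hp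
  · rcases List.mem_append.mp hq with h | h
    · right; exact List.mem_map_of_mem h
    · simp at h; left; rw [h]

theorem update_values {κ ν : Type} [BEq κ] (l : List (κ × ν)) (d : PySem.Dict κ ν)
    (q : κ × ν) (hq : q ∈ (d.update l).items) :
    q.2 ∈ d.items.map (fun p => p.2) ∨ q.2 ∈ l.map (fun p => p.2) := by
  induction l generalizing d with
  | nil =>
    left
    have hq2 : q ∈ d.items := by simpa [PySem.Dict.update] using hq
    exact List.mem_map_of_mem hq2
  | cons p l ih =>
    have hq' : q ∈ ((d.insert p.1 p.2).update l).items := by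
      simpa [PySem.Dict.update] using hq
    rcases ih (d.insert p.1 p.2) hq' with h | h
    · obtain ⟨r, hr, hre⟩ := List.mem_map.mp h
      rcases insert_values d p.1 p.2 r hr with h2 | h2
      · right; rw [← hre, h2]; exact List.mem_map_of_mem (List.mem_cons_self)
      · left; rw [← hre]; exact h2
    · right; exact List.mem_cons_of_mem _ h

theorem adj_getD_cases (choices : List (Int × List String)) (w : Int) :
    (PySem.Dict.ofList choices).getD w [] = [] ∨
    (PySem.Dict.ofList choices).getD w [] ∈ choices.map (fun p => p.2) := by
  unfold PySem.Dict.getD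
  cases hget : (PySem.Dict.ofList choices).get? w with
  | none => left; rfl
  | some vs =>
    right
    unfold PySem.Dict.get? at hget
    obtain ⟨p, hfind, hpe⟩ := Option.map_eq_some_iff.mp hget
    have hp : p ∈ (PySem.Dict.ofList choices).items := List.mem_of_find?_eq_some hfind
    have := update_values choices PySem.Dict.empty p (by simpa [PySem.Dict.ofList] using hp)
    rcases this with h | h
    · simp [PySem.Dict.empty] at h
    · simpa [hpe] using h

theorem adj_mem (choices : List (Int × List String)) (w : Int) (x : String)
    (hx : x ∈ (PySem.Dict.ofList choices).getD w []) :
    x ∈ choices.flatMap (fun p => p.2) := by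
  rcases adj_getD_cases choices w with h | h
  · rw [h] at hx; simp at hx
  · obtain ⟨p, hp, hpe⟩ := List.mem_map.mp h
    exact List.mem_flatMap.mpr ⟨p, hp, by rw [hpe]; exact hx⟩

theorem adj_len (choices : List (Int × List String)) (w : Int) :
    ((PySem.Dict.ofList choices).getD w []).length ≤ (choices.flatMap (fun p => p.2)).length := by
  rcases adj_getD_cases choices w with h | h
  · simp [h]
  · rw [List.length_flatMap]
    obtain ⟨p, hp, hpe⟩ := List.mem_map.mp h
    have : ((PySem.Dict.ofList choices).getD w []).length ∈
        choices.map (fun p => p.2.length) := by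
      rw [← hpe]
      exact List.mem_map.mpr ⟨p, hp, rfl⟩
    exact List.le_sum_of_mem this

-- seen only grows (by appending) through goA
theorem seen_prefix_add (seen : PySem.Set String) (v : String) :
    seen <+: PySem.Set.add seen v := by
  unfold PySem.Set.add
  split
  · exact List.prefix_rfl
  · exact List.prefix_append _ _

-- one-step unfolding equations for goA
theorem goA_skip (adj : PySem.Dict Int (List String)) (f : Nat) (u : Int) (v : String)
    (vs : List String) (mR : PySem.Dict String Int) (seen : PySem.Set String)
    (hc : v ∈ seen) :
    goA adj f u (v :: vs) mR seen = goA adj f u vs mR seen := by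
  rw [goA.eq_def]; simp [hc]

theorem goA_free (adj : PySem.Dict Int (List String)) (f : Nat) (u : Int) (v : String)
    (vs : List String) (mR : PySem.Dict String Int) (seen : PySem.Set String)
    (hc : v ∉ seen) (hfree : mR.get? v = none) :
    goA adj f u (v :: vs) mR seen = some (true, mR.insert v u, PySem.Set.add seen v) := by
  rw [goA.eq_def]; simp [hc, hfree]

theorem goA_zero (adj : PySem.Dict Int (List String)) (u : Int) (v : String)
    (vs : List String) (mR : PySem.Dict String Int) (seen : PySem.Set String) (w : Int)
    (hc : v ∉ seen) (hm : mR.get? v = some w) :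
    goA adj 0 u (v :: vs) mR seen = none := by
  rw [goA.eq_def]; simp [hc, hm]

theorem goA_matched (adj : PySem.Dict Int (List String)) (g : Nat) (u : Int) (v : String)
    (vs : List String) (mR : PySem.Dict String Int) (seen : PySem.Set String) (w : Int)
    (hc : v ∉ seen) (hm : mR.get? v = some w) :
    goA adj (g + 1) u (v :: vs) mR seen =
      match goA adj g w (adj.getD w []) mR (PySem.Set.add seen v) with
      | none => none
      | some (true, mR1, s1) => some (true, mR1.insert v u, s1)
      | some (false, mR1, s1) => goA adj (g + 1) u vs mR1 s1 := by
  rw [goA.eq_def]; simp [hc, hm]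

theorem not_mem_of_contains_false {seen : PySem.Set String} {v : String}
    (hc : ¬ PySem.Set.contains seen v = true) : v ∉ seen :=
  fun hmem => hc ((PySem.Set.contains_iff seen v).mpr hmem)

theorem not_mem_of_contains_false' {seen : PySem.Set String} {v : String}
    (hc : PySem.Set.contains seen v = false) : v ∉ seen :=
  not_mem_of_contains_false (by rw [hc]; simp)

theorem goA_prefix (adj : PySem.Dict Int (List String)) :
    ∀ (f : Nat) (u : Int) (nbrs : List String) (mR : PySem.Dict String Int)
      (seen : PySem.Set String) (b : Bool) (mR' : PySem.Dict String Int) (s' : PySem.Set String),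
      goA adj f u nbrs mR seen = some (b, mR', s') → seen <+: s' := by
  intro f u nbrs mR seen
  induction f, u, nbrs, mR, seen using goA.induct adj with
  | case1 x x1 mR seen =>
    intro b mR' s' h
    simp [goA] at h
    rw [← h.2.2]
  | case2 f u v vs mR seen hc ih =>
    intro b mR' s' h
    rw [goA_skip adj f u v vs mR seen ((PySem.Set.contains_iff seen v).mp hc)] at h
    exact ih b mR' s' h
  | case3 f u v vs mR seen hc hfree =>
    intro b mR' s' h
    rw [goA_free adj f u v vs mR seen (not_mem_of_contains_false hc) hfree] at h
    simp at h
    rw [← h.2.2]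
    exact seen_prefix_add seen v
  | case4 u v vs mR seen hc w hm =>
    intro b mR' s' h
    rw [goA_zero adj u v vs mR seen w (not_mem_of_contains_false hc) hm] at h
    simp at h
  | case5 u v vs mR seen hc w g hm hres ih =>
    intro b mR' s' h
    rw [goA_matched adj g u v vs mR seen w (not_mem_of_contains_false hc) hm, hres] at h
    simp at h
  | case6 u v vs mR seen hc w g hm mR1 s1 hres ih =>
    intro b mR' s' h
    rw [goA_matched adj g u v vs mR seen w (not_mem_of_contains_false hc) hm, hres] at h
    simp at h
    rw [← h.2.2]
    exact (seen_prefix_add seen v).trans (ih true mR1 s1 hres)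
  | case7 u v vs mR seen hc w g hm mR1 s1 hres ih ih2 =>
    intro b mR' s' h
    rw [goA_matched adj g u v vs mR seen w (not_mem_of_contains_false hc) hm, hres] at h
    exact ((seen_prefix_add seen v).trans (ih false mR1 s1 hres)).trans (ih2 b mR' s' h)

theorem pvUnseen_le_of_prefix (allR : List String) {s s' : PySem.Set String}
    (h : s <+: s') : pvUnseen allR s' ≤ pvUnseen allR s := by
  apply Finset.card_le_card
  apply Finset.sdiff_subset_sdiff (Finset.Subset.refl _)
  intro x hx
  rw [List.mem_toFinset] at hx ⊢
  exact h.subset hx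

theorem pvUnseen_add_lt (allR : List String) {seen : PySem.Set String} {v : String}
    (hv : v ∈ allR) (hns : v ∉ seen) :
    pvUnseen allR (PySem.Set.add seen v) < pvUnseen allR seen := by
  unfold pvUnseen
  rw [PySem.Set.add_of_not_mem hns]
  apply Finset.card_lt_card
  rw [Finset.ssubset_iff_of_subset]
  · refine ⟨v, ?_, ?_⟩
    · rw [Finset.mem_sdiff, List.mem_toFinset, List.mem_toFinset]
      exact ⟨hv, hns⟩
    · simp
  · intro x hx
    rw [Finset.mem_sdiff] at hx ⊢
    refine ⟨hx.1, fun hmem => hx.2 ?_⟩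
    rw [List.mem_toFinset] at hmem ⊢
    simp at hmem ⊢
    tauto

theorem pvUnseen_pos (allR : List String) {seen : PySem.Set String} {v : String}
    (hv : v ∈ allR) (hns : v ∉ seen) : 1 ≤ pvUnseen allR seen := by
  apply Finset.card_pos.mpr
  exact ⟨v, by rw [Finset.mem_sdiff, List.mem_toFinset, List.mem_toFinset]; exact ⟨hv, hns⟩⟩

theorem pvUnseen_empty_le (allR : List String) :
    pvUnseen allR PySem.Set.empty ≤ allR.length := by
  unfold pvUnseen
  calc (allR.toFinset \ (PySem.Set.empty : PySem.Set String).toFinset).card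
      ≤ allR.toFinset.card := Finset.card_le_card (Finset.sdiff_subset)
    _ ≤ allR.length := List.toFinset_card_le allR

-- sufficiency: with fuel ≥ pvUnseen the DFS never runs out
theorem goA_isSome (adj : PySem.Dict Int (List String)) (allR : List String)
    (Hmem : ∀ (w : Int) (x : String), x ∈ adj.getD w [] → x ∈ allR) :
    ∀ (f : Nat) (u : Int) (nbrs : List String) (mR : PySem.Dict String Int)
      (seen : PySem.Set String),
      (∀ x ∈ nbrs, x ∈ allR) → pvUnseen allR seen ≤ f →
      goA adj f u nbrs mR seen ≠ none := by
  intro f u nbrs mR seen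
  induction f, u, nbrs, mR, seen using goA.induct adj with
  | case1 x x1 mR seen => intro hn hf; simp [goA]
  | case2 f u v vs mR seen hc ih =>
    intro hn hf
    rw [goA_skip adj f u v vs mR seen ((PySem.Set.contains_iff seen v).mp hc)]
    exact ih (fun x hx => hn x (List.mem_cons_of_mem v hx)) hf
  | case3 f u v vs mR seen hc hfree =>
    intro hn hf
    rw [goA_free adj f u v vs mR seen (not_mem_of_contains_false hc) hfree]
    simp
  | case4 u v vs mR seen hc w hm =>
    intro hn hf
    have hv : v ∈ allR := hn v List.mem_cons_self
    have := pvUnseen_pos allR hv (not_mem_of_contains_false hc)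
    omega
  | case5 u v vs mR seen hc w g hm hres ih =>
    intro hn hf
    have hv : v ∈ allR := hn v List.mem_cons_self
    have hlt := pvUnseen_add_lt allR hv (not_mem_of_contains_false hc)
    exact absurd hres (ih (fun x hx => Hmem w x hx) (by omega))
  | case6 u v vs mR seen hc w g hm mR1 s1 hres ih =>
    intro hn hf
    rw [goA_matched adj g u v vs mR seen w (not_mem_of_contains_false hc) hm, hres]
    simp
  | case7 u v vs mR seen hc w g hm mR1 s1 hres ih ih2 =>
    intro hn hf
    rw [goA_matched adj g u v vs mR seen w (not_mem_of_contains_false hc) hm, hres]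
    have hpre : PySem.Set.add seen v <+: s1 :=
      goA_prefix adj g w (adj.getD w []) mR (PySem.Set.add seen v) false mR1 s1 hres
    have h1 := pvUnseen_le_of_prefix allR hpre
    have h2 := pvUnseen_le_of_prefix allR (seen_prefix_add seen v)
    exact ih2 (fun x hx => hn x (List.mem_cons_of_mem v hx)) (by omega)

-- fuel monotonicity
theorem goA_mono (adj : PySem.Dict Int (List String)) :
    ∀ (f : Nat) (u : Int) (nbrs : List String) (mR : PySem.Dict String Int)
      (seen : PySem.Set String) (f' : Nat)
      (r : Bool × PySem.Dict String Int × PySem.Set String),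
      f ≤ f' → goA adj f u nbrs mR seen = some r → goA adj f' u nbrs mR seen = some r := by
  intro f u nbrs mR seen
  induction f, u, nbrs, mR, seen using goA.induct adj with
  | case1 x x1 mR seen =>
    intro f' r hle h
    simp [goA] at h ⊢
    exact h
  | case2 f u v vs mR seen hc ih =>
    intro f' r hle h
    have hv := (PySem.Set.contains_iff seen v).mp hc
    rw [goA_skip adj f u v vs mR seen hv] at h
    rw [goA_skip adj f' u v vs mR seen hv]
    exact ih f' r hle h
  | case3 f u v vs mR seen hc hfree =>
    intro f' r hle h
    have hv := not_mem_of_contains_false hc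
    rw [goA_free adj f u v vs mR seen hv hfree] at h
    rw [goA_free adj f' u v vs mR seen hv hfree]
    exact h
  | case4 u v vs mR seen hc w hm =>
    intro f' r hle h
    rw [goA_zero adj u v vs mR seen w (not_mem_of_contains_false hc) hm] at h
    exact absurd h (by simp)
  | case5 u v vs mR seen hc w g hm hres ih =>
    intro f' r hle h
    rw [goA_matched adj g u v vs mR seen w (not_mem_of_contains_false hc) hm, hres] at h
    exact absurd h (by simp)
  | case6 u v vs mR seen hc w g hm mR1 s1 hres ih =>
    intro f' r hle h
    have hv := not_mem_of_contains_false hc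
    obtain ⟨g', rfl⟩ : ∃ g', f' = g' + 1 := ⟨f' - 1, by omega⟩
    rw [goA_matched adj g u v vs mR seen w hv hm, hres] at h
    rw [goA_matched adj g' u v vs mR seen w hv hm,
      ih g' (true, mR1, s1) (by omega) hres]
    exact h
  | case7 u v vs mR seen hc w g hm mR1 s1 hres ih ih2 =>
    intro f' r hle h
    have hv := not_mem_of_contains_false hc
    obtain ⟨g', rfl⟩ : ∃ g', f' = g' + 1 := ⟨f' - 1, by omega⟩
    rw [goA_matched adj g u v vs mR seen w hv hm, hres] at h
    rw [goA_matched adj g' u v vs mR seen w hv hm,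
      ih g' (false, mR1, s1) (by omega) hres]
    exact ih2 (g' + 1) r (by omega) h

-- with sufficient fuel the result is the canonical one
theorem goA_canon (adj : PySem.Dict Int (List String)) (allR : List String)
    (Hmem : ∀ (w : Int) (x : String), x ∈ adj.getD w [] → x ∈ allR)
    (f : Nat) (u : Int) (nbrs : List String) (mR : PySem.Dict String Int)
    (seen : PySem.Set String)
    (hn : ∀ x ∈ nbrs, x ∈ allR) (hf : pvUnseen allR seen ≤ f) :
    goA adj f u nbrs mR seen = goAC adj allR u nbrs mR seen := by
  have h0 : goA adj (pvUnseen allR seen) u nbrs mR seen ≠ none :=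
    goA_isSome adj allR Hmem (pvUnseen allR seen) u nbrs mR seen hn (le_refl _)
  cases hres : goA adj (pvUnseen allR seen) u nbrs mR seen with
  | none => exact absurd hres h0
  | some r =>
    unfold goAC
    rw [goA_mono adj (pvUnseen allR seen) u nbrs mR seen f r hf hres, hres]

theorem goAC_nil (adj : PySem.Dict Int (List String)) (allR : List String)
    (u : Int) (mR : PySem.Dict String Int) (seen : PySem.Set String) :
    goAC adj allR u [] mR seen = some (false, mR, seen) := by
  simp [goAC, goA]

theorem goAC_skip (adj : PySem.Dict Int (List String)) (allR : List String)
    (u : Int) (v : String) (vs : List String) (mR : PySem.Dict String Int)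
    (seen : PySem.Set String) (h : PySem.Set.contains seen v = true) :
    goAC adj allR u (v :: vs) mR seen = goAC adj allR u vs mR seen := by
  unfold goAC
  rw [goA_skip adj _ u v vs mR seen ((PySem.Set.contains_iff seen v).mp h)]

theorem goAC_free (adj : PySem.Dict Int (List String)) (allR : List String)
    (u : Int) (v : String) (vs : List String) (mR : PySem.Dict String Int)
    (seen : PySem.Set String) (h : PySem.Set.contains seen v = false)
    (hfree : mR.get? v = none) :
    goAC adj allR u (v :: vs) mR seen =
      some (true, mR.insert v u, PySem.Set.add seen v) := by
  unfold goAC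
  rw [goA_free adj _ u v vs mR seen (not_mem_of_contains_false' h) hfree]

theorem goAC_matched (adj : PySem.Dict Int (List String)) (allR : List String)
    (Hmem : ∀ (w : Int) (x : String), x ∈ adj.getD w [] → x ∈ allR)
    (u : Int) (v : String) (vs : List String) (mR : PySem.Dict String Int)
    (seen : PySem.Set String) (w : Int)
    (hv : v ∈ allR) (hvs : ∀ x ∈ vs, x ∈ allR)
    (h : PySem.Set.contains seen v = false) (hm : mR.get? v = some w) :
    goAC adj allR u (v :: vs) mR seen =
      match goAC adj allR w (adj.getD w []) mR (PySem.Set.add seen v) with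
      | none => none
      | some (true, mR1, s1) => some (true, mR1.insert v u, s1)
      | some (false, mR1, s1) => goAC adj allR u vs mR1 s1 := by
  have hvnot : v ∉ seen := not_mem_of_contains_false' h
  have h1 : 1 ≤ pvUnseen allR seen := pvUnseen_pos allR hv hvnot
  have hlt := pvUnseen_add_lt allR hv hvnot
  obtain ⟨g, hg⟩ : ∃ g, pvUnseen allR seen = g + 1 := ⟨pvUnseen allR seen - 1, by omega⟩
  have hcan := goA_canon adj allR Hmem g w (adj.getD w []) mR (PySem.Set.add seen v)
    (fun x hx => Hmem w x hx) (by omega)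
  simp only [goAC] at hcan ⊢
  rw [hg, goA_matched adj g u v vs mR seen w hvnot hm, hcan]
  cases hres2 : goA adj (pvUnseen allR (PySem.Set.add seen v)) w (adj.getD w []) mR
      (PySem.Set.add seen v) with
  | none => simp
  | some r =>
    obtain ⟨b, mR1, s1⟩ := r
    cases b with
    | true => simp
    | false =>
      simp only
      rw [← hg]
      have hpre := goA_prefix adj (pvUnseen allR (PySem.Set.add seen v)) w (adj.getD w []) mR
        (PySem.Set.add seen v) false mR1 s1 hres2
      have h2 := pvUnseen_le_of_prefix allR hpre
      have hcan2 := goA_canon adj allR Hmem (pvUnseen allR seen) u vs mR1 s1 hvs (by omega)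
      simp only [goAC] at hcan2
      rw [hcan2]

theorem specStack_cons (adj : PySem.Dict Int (List String)) (allR : List String)
    (u : Int) (via : Option String) (nbrs : List String)
    (rest : List (Int × Option String × List String))
    (mR : PySem.Dict String Int) (seen : PySem.Set String) :
    specStack adj allR ((u, via, nbrs) :: rest) mR seen =
      match goAC adj allR u nbrs mR seen with
      | none => none
      | some (true, mR1, _) => some (true, flipB rest mR1)
      | some (false, mR1, s1) => specStack adj allR rest mR1 s1 := rfl

-- the stack machine computes the A-side meaning of its stack
theorem stepB_spec (adj : PySem.Dict Int (List String)) (allR : List String)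
    (Hmem : ∀ (w : Int) (x : String), x ∈ adj.getD w [] → x ∈ allR)
    (Hlen : ∀ w : Int, (adj.getD w []).length ≤ allR.length) :
    ∀ (f : Nat) (stack : List (Int × Option String × List String))
      (mR : PySem.Dict String Int) (seen : PySem.Set String),
      (∀ fr ∈ stack, ∀ x ∈ fr.2.2, x ∈ allR) →
      pvUnseen allR seen * (allR.length + 2) + pvWt stack < f →
      stepB adj f stack mR seen = specStack adj allR stack mR seen := by
  intro f
  induction f with
  | zero => intro stack mR seen hfr hmu; omega
  | succ f ih =>
    intro stack mR seen hfr hmu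
    match stack with
    | [] => simp [stepB, specStack]
    | (u, via, nbrs) :: rest =>
      match nbrs with
      | [] =>
        have hstep : stepB adj (f + 1) ((u, via, []) :: rest) mR seen =
            stepB adj f rest mR seen := rfl
        rw [hstep, ih rest mR seen (fun fr hfr2 => hfr fr (List.mem_cons_of_mem _ hfr2))
          (by simp [pvWt] at hmu ⊢; omega)]
        rw [specStack_cons, goAC_nil]
      | v :: rest' =>
        by_cases hc : v ∈ seen
        · have hcb : PySem.Set.contains seen v = true := (PySem.Set.contains_iff seen v).mpr hc
          have hstep : stepB adj (f + 1) ((u, via, v :: rest') :: rest) mR seen =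
              stepB adj f ((u, via, rest') :: rest) mR seen := by
            simp [stepB, hc]
          have hfr2 : ∀ fr ∈ (u, via, rest') :: rest, ∀ x ∈ fr.2.2, x ∈ allR := by
            intro fr hmem x hx
            rcases List.mem_cons.mp hmem with rfl | hmem2
            · exact hfr (u, via, v :: rest') List.mem_cons_self x (List.mem_cons_of_mem v hx)
            · exact hfr fr (List.mem_cons_of_mem _ hmem2) x hx
          rw [hstep, ih ((u, via, rest') :: rest) mR seen hfr2
            (by simp [pvWt] at hmu ⊢; omega)]
          rw [specStack_cons, specStack_cons,
            goAC_skip adj allR u v rest' mR seen hcb]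
        · have hcb : PySem.Set.contains seen v = false := by
            cases hcc : PySem.Set.contains seen v with
            | false => rfl
            | true => exact absurd ((PySem.Set.contains_iff seen v).mp hcc) hc
          have hv : v ∈ allR :=
            hfr (u, via, v :: rest') List.mem_cons_self v List.mem_cons_self
          have hvs : ∀ x ∈ rest', x ∈ allR := fun x hx =>
            hfr (u, via, v :: rest') List.mem_cons_self x (List.mem_cons_of_mem v hx)
          cases hm : mR.get? v with
          | none =>
            have hstep : stepB adj (f + 1) ((u, via, v :: rest') :: rest) mR seen =
                some (true, flipB rest (mR.insert v u)) := by
              simp [stepB, hc, hm]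
            rw [hstep, specStack_cons, goAC_free adj allR u v rest' mR seen hcb hm]
          | some w =>
            have hstep : stepB adj (f + 1) ((u, via, v :: rest') :: rest) mR seen =
                stepB adj f ((w, none, adj.getD w []) :: (u, some v, rest') :: rest) mR
                  (PySem.Set.add seen v) := by
              simp [stepB, hc, hm]
            have hfr2 : ∀ fr ∈ (w, none, adj.getD w []) :: (u, some v, rest') :: rest,
                ∀ x ∈ fr.2.2, x ∈ allR := by
              intro fr hmem x hx
              rcases List.mem_cons.mp hmem with rfl | hmem2
              · exact Hmem w x hx
              rcases List.mem_cons.mp hmem2 with rfl | hmem3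
              · exact hvs x hx
              · exact hfr fr (List.mem_cons_of_mem _ hmem3) x hx
            have hU1 := pvUnseen_add_lt allR hv hc
            have hL := Hlen w
            have hmul : pvUnseen allR (PySem.Set.add seen v) * (allR.length + 2) +
                (allR.length + 2) ≤ pvUnseen allR seen * (allR.length + 2) := by
              have hh := Nat.mul_le_mul_right (allR.length + 2)
                (show pvUnseen allR (PySem.Set.add seen v) + 1 ≤ pvUnseen allR seen by omega)
              simpa [Nat.succ_mul] using hh
            rw [hstep, ih ((w, none, adj.getD w []) :: (u, some v, rest') :: rest) mR
              (PySem.Set.add seen v) hfr2 (by simp [pvWt] at hmu ⊢; omega)]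
            rw [specStack_cons, specStack_cons,
              goAC_matched adj allR Hmem u v rest' mR seen w hv hvs hcb hm]
            cases hres : goAC adj allR w (adj.getD w []) mR (PySem.Set.add seen v) with
            | none => simp
            | some r =>
              obtain ⟨b, mR1, s1⟩ := r
              cases b with
              | true => simp [flipB]
              | false => simp [specStack_cons]

theorem loop_eq (adj : PySem.Dict Int (List String)) (allR : List String)
    (Hmem : ∀ (w : Int) (x : String), x ∈ adj.getD w [] → x ∈ allR)
    (Hlen : ∀ w : Int, (adj.getD w []).length ≤ allR.length) :
    ∀ (us : List Int) (mR : PySem.Dict String Int),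
      loopA adj allR.length us mR =
      loopB adj (allR.length * (allR.length + 2) + allR.length + 2) us mR := by
  intro us
  induction us with
  | nil => intro mR; rfl
  | cons u us ih =>
    intro mR
    have hA : goA adj allR.length u (adj.getD u []) mR PySem.Set.empty =
        goAC adj allR u (adj.getD u []) mR PySem.Set.empty :=
      goA_canon adj allR Hmem allR.length u (adj.getD u []) mR PySem.Set.empty
        (fun x hx => Hmem u x hx) (pvUnseen_empty_le allR)
    have hB : stepB adj (allR.length * (allR.length + 2) + allR.length + 2)
          [(u, none, adj.getD u [])] mR PySem.Set.empty =
        specStack adj allR [(u, none, adj.getD u [])] mR PySem.Set.empty := by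
      apply stepB_spec adj allR Hmem Hlen
      · intro fr hmem x hx
        rcases List.mem_cons.mp hmem with rfl | hmem2
        · exact Hmem u x hx
        · simp at hmem2
      · have h1 := pvUnseen_empty_le allR
        have h2 := Hlen u
        have hmul : pvUnseen allR PySem.Set.empty * (allR.length + 2) ≤
            allR.length * (allR.length + 2) :=
          Nat.mul_le_mul_right (allR.length + 2) h1
        simp only [pvWt]
        omega
    simp only [loopA, loopB, hA, hB, specStack_cons]
    cases hres : goAC adj allR u (adj.getD u []) mR PySem.Set.empty with
    | none => rfl
    | some r =>
      obtain ⟨b, mR1, s1⟩ := r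
      cases b with
      | true =>
        simp only [flipB]
        exact ih mR1
      | false => simp [specStack]


-- ===== VERDICT (by name: the statement is the Claim_ definition above) =====
theorem perfect_matching_py_spec : Claim_equal_perfect_matching_py := by
  intro choices _
  unfold Spec_perfect_matching_py perfect_matching_py perfect_matching_py_alt
  exact loop_eq (PySem.Dict.ofList choices) (choices.flatMap fun p => p.2)
    (adj_mem choices) (adj_len choices) (PySem.Dict.ofList choices).keys PySem.Dict.empty
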